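-- pv_equiv track=rewrite | github.com/Eugeneowner/Data-Science | HomeWork_3/src/main.py | checkProfessorConsistency
-- ===== SOURCE A (Python) =====
-- def checkProfessorConsistency(records, minScore=50, maxScore=100):
--     passingScores = [score for score, passed in records if passed]
--     failingScores = [score for score, passed in records if not passed]
--
--     if passingScores and failingScores:
--         minPass = min(passingScores)
--         maxFail = max(failingScores)
--         if maxFail < minPass:
--             return True, (maxFail + 1, minPass)
--         return False, None
--
--     if passingScores and not failingScores:
--         minPass = min(passingScores)
--         return True, (minScore, minPass)
--
--     if failingScores and not passingScores:
--         maxFail = max(failingScores)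
--         low = maxFail + 1
--         high = maxScore
--         return True, (low, high) if low <= high else (low, low)
--
--     return True, (minScore, maxScore)
-- ===== SOURCE B (Python) =====
-- def checkProfessorConsistency(records, minScore=50, maxScore=100):
--     # Sort by score; then the smallest passing score is the first passing
--     # record and the largest failing score is the last failing record.
--     ordered = sorted(records, key=lambda r: r[0])
--     firstPass = next((score for score, passed in ordered if passed), None)
--     lastFail = next((score for score, passed in reversed(ordered) if not passed), None)
--
--     if firstPass is not None and lastFail is not None:
--         if lastFail < firstPass:
--             return True, (lastFail + 1, firstPass)
--         return False, None
--     if firstPass is not None: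
--         return True, (minScore, firstPass)
--     if lastFail is not None:
--         low = lastFail + 1
--         return True, (low, maxScore) if low <= maxScore else (low, low)
--     return True, (minScore, maxScore)
-- ===== Notes on version B (the rewrite author's own statement) =====
-- stated objective: alternative
-- what changed: Instead of building the passing/failing score lists and running min()/max() over them, B sorts the records by score once and reads the extrema positionally: the first passing record in sorted order gives minPass and the last failing record gives maxFail; the branch logic then works on these two optionals.
import Mathlib
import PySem

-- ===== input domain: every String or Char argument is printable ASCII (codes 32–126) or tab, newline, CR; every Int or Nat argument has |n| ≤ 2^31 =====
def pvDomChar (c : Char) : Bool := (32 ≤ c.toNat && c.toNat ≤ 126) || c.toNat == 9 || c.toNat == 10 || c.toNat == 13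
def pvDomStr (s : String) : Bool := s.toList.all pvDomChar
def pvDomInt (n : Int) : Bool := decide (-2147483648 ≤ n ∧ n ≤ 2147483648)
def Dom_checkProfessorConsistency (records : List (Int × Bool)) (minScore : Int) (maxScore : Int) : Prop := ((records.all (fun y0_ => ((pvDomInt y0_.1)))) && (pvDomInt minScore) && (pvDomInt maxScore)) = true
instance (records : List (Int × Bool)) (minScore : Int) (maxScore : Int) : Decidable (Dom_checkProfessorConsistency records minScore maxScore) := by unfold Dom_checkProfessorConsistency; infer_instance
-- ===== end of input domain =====

-- B sorts the records by score once and reads the extrema positionally (first passing / last failing record) instead of building score lists and running min/max (objective: alternative).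

-- ===== PORT A =====
-- A builds the two filtered score lists, then takes min/max of the nonempty ones.
def checkProfessorConsistency (records : List (Int × Bool)) (minScore : Int) (maxScore : Int) : Bool × (Option (Int × Int)) :=
  let passingScores := (records.filter (fun r => r.2)).map (fun r => r.1)
  let failingScores := (records.filter (fun r => !r.2)).map (fun r => r.1)
  if !passingScores.isEmpty && !failingScores.isEmpty then
    -- min/max of a list A has just checked to be nonempty; the getD default is unreachable
    let minPass := (PySem.List.min? passingScores (fun y => y)).getD 0
    let maxFail := (PySem.List.max? failingScores (fun y => y)).getD 0
    if maxFail < minPass then (true, some (maxFail + 1, minPass)) else (false, none)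
  else if !passingScores.isEmpty && failingScores.isEmpty then
    let minPass := (PySem.List.min? passingScores (fun y => y)).getD 0
    (true, some (minScore, minPass))
  else if !failingScores.isEmpty && passingScores.isEmpty then
    let maxFail := (PySem.List.max? failingScores (fun y => y)).getD 0
    let low := maxFail + 1
    let high := maxScore
    (true, if low ≤ high then some (low, high) else some (low, low))
  else
    (true, some (minScore, maxScore))

-- ===== PORT B =====
-- B: sort by score; firstPass = first passing record in sorted order, lastFail = last failing one.
def checkProfessorConsistency_alt (records : List (Int × Bool)) (minScore : Int) (maxScore : Int) : Bool × (Option (Int × Int)) :=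
  let ordered := PySem.List.sorted records (fun r => r.1) false
  -- next((score for score, passed in ordered if passed), None)
  let firstPass := (ordered.find? (fun r => r.2)).map (fun r => r.1)
  -- next((score for score, passed in reversed(ordered) if not passed), None)
  let lastFail := (ordered.reverse.find? (fun r => !r.2)).map (fun r => r.1)
  match firstPass, lastFail with
  | some mp, some mf =>
      if mf < mp then (true, some (mf + 1, mp)) else (false, none)
  | some mp, none => (true, some (minScore, mp))
  | none, some mf =>
      let low := mf + 1
      if low ≤ maxScore then (true, some (low, maxScore)) else (true, some (low, low))
  | none, none => (true, some (minScore, maxScore))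

-- ===== PRECONDITION & SPEC =====
def Spec_checkProfessorConsistency (records : List (Int × Bool)) (minScore : Int) (maxScore : Int) (out : Bool × (Option (Int × Int))) : Prop := out = checkProfessorConsistency_alt records minScore maxScore
instance (records : List (Int × Bool)) (minScore : Int) (maxScore : Int) (out : Bool × (Option (Int × Int))) : Decidable (Spec_checkProfessorConsistency records minScore maxScore out) := by unfold Spec_checkProfessorConsistency; infer_instance

-- ===== CLAIM (what is proved, stated in full; the proofs are below) =====
def Claim_equal_checkProfessorConsistency : Prop := ∀ (records : List (Int × Bool)) (minScore : Int) (maxScore : Int), Dom_checkProfessorConsistency records minScore maxScore → Spec_checkProfessorConsistency records minScore maxScore (checkProfessorConsistency records minScore maxScore)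

-- ===== LEMMAS AND PROOFS =====

-- The first record satisfying p in score-sorted order carries the minimum of the p-filtered scores.
theorem pvFind_sorted_min (records : List (Int × Bool)) (p : Int × Bool → Bool) :
    ((PySem.List.sorted records (fun r => r.1) false).find? p).map (fun r => r.1)
      = PySem.List.min? ((records.filter p).map (fun r => r.1)) (fun y => y) := by
  cases hf : (PySem.List.sorted records (fun r => r.1) false).find? p with
  | none =>
    have hall := List.find?_eq_none.mp hf
    have hfe : records.filter p = [] := by
      rw [List.filter_eq_nil_iff]
      intro x hx
      exact hall x ((PySem.List.mem_sorted records (fun r => r.1) false x).mpr hx)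
    rw [hfe]
    simp [(PySem.List.min?_eq_none_iff ([] : List Int) (fun y => y)).mpr rfl]
  | some r =>
    obtain ⟨hpr, as, bs, hsplit, hfail⟩ := List.find?_eq_some_iff_append.mp hf
    have hrmem : r ∈ records := by
      rw [← PySem.List.mem_sorted records (fun r => r.1) false, hsplit]
      simp
    have hmm : r.1 ∈ (records.filter p).map (fun r => r.1) :=
      List.mem_map.mpr ⟨r, List.mem_filter.mpr ⟨hrmem, hpr⟩, rfl⟩
    cases hm : PySem.List.min? ((records.filter p).map (fun r => r.1)) (fun y => y) with
    | none =>
      rw [PySem.List.min?_eq_none_iff] at hm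
      rw [hm] at hmm
      exact absurd hmm (List.not_mem_nil)
    | some m =>
      have h1 : m ≤ r.1 := PySem.List.min?_isMin hm r.1 hmm
      obtain ⟨x, hxmem, hx1⟩ := List.mem_map.mp (PySem.List.min?_mem hm)
      have hxq : x ∈ PySem.List.sorted records (fun r => r.1) false :=
        (PySem.List.mem_sorted records (fun r => r.1) false x).mpr (List.mem_filter.mp hxmem).1
      have hpw := PySem.List.sorted_pairwise records (fun r => r.1)
      rw [hsplit] at hxq hpw
      have h2 : r.1 ≤ x.1 := by
        rcases List.mem_append.mp hxq with hxa | hxc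
        · exact absurd ((List.mem_filter.mp hxmem).2) (by simpa using hfail x hxa)
        · rcases List.mem_cons.mp hxc with rfl | hxb
          · exact le_refl _
          · exact List.rel_of_pairwise_cons (List.pairwise_append.mp hpw).2.1 hxb
      have : r.1 = m := le_antisymm (hx1 ▸ h2) h1
      simp [this]

-- The last record satisfying p in score-sorted order carries the maximum of the p-filtered scores.
theorem pvFind_sorted_max (records : List (Int × Bool)) (p : Int × Bool → Bool) :
    ((PySem.List.sorted records (fun r => r.1) false).reverse.find? p).map (fun r => r.1)
      = PySem.List.max? ((records.filter p).map (fun r => r.1)) (fun y => y) := by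
  cases hf : (PySem.List.sorted records (fun r => r.1) false).reverse.find? p with
  | none =>
    have hall := List.find?_eq_none.mp hf
    have hfe : records.filter p = [] := by
      rw [List.filter_eq_nil_iff]
      intro x hx
      exact hall x (List.mem_reverse.mpr
        ((PySem.List.mem_sorted records (fun r => r.1) false x).mpr hx))
    rw [hfe]
    simp [(PySem.List.max?_eq_none_iff ([] : List Int) (fun y => y)).mpr rfl]
  | some r =>
    obtain ⟨hpr, as, bs, hsplit, hfail⟩ := List.find?_eq_some_iff_append.mp hf
    have hrmem : r ∈ records := by
      rw [← PySem.List.mem_sorted records (fun r => r.1) false, ← List.mem_reverse, hsplit]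
      simp
    have hmm : r.1 ∈ (records.filter p).map (fun r => r.1) :=
      List.mem_map.mpr ⟨r, List.mem_filter.mpr ⟨hrmem, hpr⟩, rfl⟩
    cases hm : PySem.List.max? ((records.filter p).map (fun r => r.1)) (fun y => y) with
    | none =>
      rw [PySem.List.max?_eq_none_iff] at hm
      rw [hm] at hmm
      exact absurd hmm (List.not_mem_nil)
    | some m =>
      have h1 : r.1 ≤ m := PySem.List.max?_isMax hm r.1 hmm
      obtain ⟨x, hxmem, hx1⟩ := List.mem_map.mp (PySem.List.max?_mem hm)
      have hxq : x ∈ (PySem.List.sorted records (fun r => r.1) false).reverse :=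
        List.mem_reverse.mpr
          ((PySem.List.mem_sorted records (fun r => r.1) false x).mpr (List.mem_filter.mp hxmem).1)
      have hpw : ((PySem.List.sorted records (fun r => r.1) false).reverse).Pairwise
          (fun a b => b.1 ≤ a.1) :=
        List.pairwise_reverse.mpr (PySem.List.sorted_pairwise records (fun r => r.1))
      rw [hsplit] at hxq hpw
      have h2 : x.1 ≤ r.1 := by
        rcases List.mem_append.mp hxq with hxa | hxc
        · exact absurd ((List.mem_filter.mp hxmem).2) (by simpa using hfail x hxa)
        · rcases List.mem_cons.mp hxc with rfl | hxb
          · exact le_refl _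
          · exact List.rel_of_pairwise_cons (List.pairwise_append.mp hpw).2.1 hxb
      have : r.1 = m := le_antisymm h1 (hx1 ▸ h2)
      simp [this]

-- ===== VERDICT (by name: the statement is the Claim_ definition above) =====
theorem checkProfessorConsistency_spec : Claim_equal_checkProfessorConsistency := by
  intro records minScore maxScore _
  unfold Spec_checkProfessorConsistency checkProfessorConsistency checkProfessorConsistency_alt
  dsimp only
  rw [pvFind_sorted_min records (fun r => r.2), pvFind_sorted_max records (fun r => !r.2)]
  cases hP : PySem.List.min? ((records.filter (fun r => r.2)).map (fun r => r.1)) (fun y => y) with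
  | none =>
    have hPi : ((records.filter (fun r => r.2)).map (fun r => r.1)).isEmpty = true := by
      simp [(PySem.List.min?_eq_none_iff _ _).mp hP]
    cases hF : PySem.List.max? ((records.filter (fun r => !r.2)).map (fun r => r.1)) (fun y => y) with
    | none =>
      have hFi : ((records.filter (fun r => !r.2)).map (fun r => r.1)).isEmpty = true := by
        simp [(PySem.List.max?_eq_none_iff _ _).mp hF]
      simp only [hPi, hFi, Bool.not_true, Bool.and_self, Bool.false_and,
        if_false, Bool.false_eq_true]
    | some mf =>
      have hFi : ((records.filter (fun r => !r.2)).map (fun r => r.1)).isEmpty = false := by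
        rw [List.isEmpty_eq_false_iff]
        intro h; rw [h] at hF; simp [PySem.List.max?] at hF
      simp only [hPi, hFi, Bool.not_true, Bool.not_false, Bool.and_false,
        Bool.and_true, if_true, if_false, Bool.false_eq_true,
        Option.getD_some, if_true]
      split <;> rfl
  | some mp =>
    have hPi : ((records.filter (fun r => r.2)).map (fun r => r.1)).isEmpty = false := by
      rw [List.isEmpty_eq_false_iff]
      intro h; rw [h] at hP; simp [PySem.List.min?] at hP
    cases hF : PySem.List.max? ((records.filter (fun r => !r.2)).map (fun r => r.1)) (fun y => y) with
    | none =>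
      have hFi : ((records.filter (fun r => !r.2)).map (fun r => r.1)).isEmpty = true := by
        simp [(PySem.List.max?_eq_none_iff _ _).mp hF]
      simp only [hPi, hFi, Bool.not_false, Bool.not_true, Bool.and_true,
        Bool.and_false, if_true, if_false, Bool.false_eq_true,
        Option.getD_some]
    | some mf =>
      have hFi : ((records.filter (fun r => !r.2)).map (fun r => r.1)).isEmpty = false := by
        rw [List.isEmpty_eq_false_iff]
        intro h; rw [h] at hF; simp [PySem.List.max?] at hF
      simp only [hPi, hFi, Bool.not_false, Bool.and_self, if_true,
        Option.getD_some]
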